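-- pv_equiv track=rewrite | github.com/luyifan/ContentSearch | 信息检索包括report和代码和ppt/code/searchengine/dowithfile.py | dowithcolor2
-- ===== SOURCE A (Python) =====
-- def dowithcolor2 ( str1 ):
--
--     start = 0
--     str2 = ''
--     while( True ):
--         agostart = start
--         start = str1.find ( "[/color]" , start )
--         #print ( start )
--         if ( start == -1 ):
--             break
--         str2 = str2 + str1 [ agostart : start ]
--         #print ( str2 )
--         final = str1.find ( "]" , start )
--         start = final + 1
--     stringlen = len ( str1 )
--     str2 = str2 + str1 [ agostart : stringlen ]
--     #print ( str2 )
--     return str2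
-- ===== SOURCE B (Python) =====
-- def dowithcolor2(str1):
--     return str1.replace("[/color]", "")
-- ===== Notes on version B (the rewrite author's own statement) =====
-- stated objective: idiomatic
-- what changed: Replaces A's explicit find-cursor while-loop with repeated string concatenation by a single str.replace call that deletes every occurrence of the tag.
import Mathlib
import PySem

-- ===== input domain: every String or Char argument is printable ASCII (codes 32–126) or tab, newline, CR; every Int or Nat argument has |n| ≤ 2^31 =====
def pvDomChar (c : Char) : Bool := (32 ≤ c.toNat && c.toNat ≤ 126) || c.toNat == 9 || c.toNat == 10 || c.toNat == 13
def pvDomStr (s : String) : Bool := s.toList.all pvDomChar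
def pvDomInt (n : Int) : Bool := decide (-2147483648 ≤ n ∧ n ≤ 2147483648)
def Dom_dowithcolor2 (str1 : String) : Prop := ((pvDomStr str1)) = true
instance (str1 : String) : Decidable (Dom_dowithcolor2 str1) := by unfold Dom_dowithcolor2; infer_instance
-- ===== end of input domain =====

-- B replaces A's find-cursor loop (which rebuilds str2 by repeated concatenation) with a single
-- str.replace call deleting every literal "[/color]" occurrence; same return value everywhere.

-- ===== PORT A =====
-- the literal "[/color]" A searches for
def pvTag : List Char := ['[', '/', 'c', 'o', 'l', 'o', 'r', ']']

-- A's while-loop, state (start, str2); 'agostart = start' happens at the top of each iteration,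
-- so the first component of the returned pair at break IS agostart.  fuel = len+1 only makes the
-- recursion total (each iteration moves start forward); the proof shows it is never exhausted.
def dowithcolor2Loop (cs : List Char) (fuel : Nat) (start : Int) (str2 : List Char) :
    Int × List Char :=
  match fuel with
  | 0 => (start, str2)
  | fuel + 1 =>
    let agostart := start
    let s := PySem.Chars.findFrom cs pvTag start
    if s = -1 then (agostart, str2)
    else
      let final := PySem.Chars.findFrom cs [']'] s
      dowithcolor2Loop cs fuel (final + 1)
        (str2 ++ PySem.List.slice cs (some agostart) (some s))

def dowithcolor2 (str1 : String) : String :=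
  let cs := str1.toList
  let r := dowithcolor2Loop cs (cs.length + 1) 0 []
  String.ofList (r.2 ++ PySem.List.slice cs (some r.1) (some (cs.length : Int)))

-- ===== PORT B =====
def dowithcolor2_alt (str1 : String) : String :=
  PySem.Str.replace str1 "[/color]" ""

-- ===== PRECONDITION & SPEC =====
def Spec_dowithcolor2 (str1 : String) (out : String) : Prop := out = dowithcolor2_alt str1
instance (str1 : String) (out : String) : Decidable (Spec_dowithcolor2 str1 out) := by unfold Spec_dowithcolor2; infer_instance

-- ===== CLAIM (what is proved, stated in full; the proofs are below) =====
def Claim_equal_dowithcolor2 : Prop := ∀ (str1 : String), Dom_dowithcolor2 str1 → Spec_dowithcolor2 str1 (dowithcolor2 str1)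

-- ===== LEMMAS AND PROOFS =====

-- the common semantic core: delete every occurrence of pvTag, left to right
def removeTag : List Char → List Char
  | [] => []
  | c :: rest =>
    if pvTag.isPrefixOf (c :: rest) then removeTag ((c :: rest).drop pvTag.length)
    else c :: removeTag rest
termination_by l => l.length
decreasing_by
  all_goals simp [pvTag]

lemma removeTag_of_not_infix (l : List Char) (h : ¬ pvTag <:+: l) : removeTag l = l := by
  induction l with
  | nil => simp [removeTag]
  | cons c t ih =>
    rw [removeTag]
    rw [if_neg, ih]
    · exact fun hi => h (hi.trans (List.suffix_cons c t).isInfix)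
    · intro hp
      exact h ((List.isPrefixOf_iff_prefix.mp hp).isInfix)

lemma removeTag_first_occ (l : List Char) (j : Nat)
    (hocc : pvTag <+: l.drop j) (hmin : ∀ i < j, ¬ pvTag <+: l.drop i) :
    removeTag l = l.take j ++ removeTag (l.drop (j + pvTag.length)) := by
  induction l generalizing j with
  | nil => simp at hocc; simp [hocc, removeTag] at *
  | cons c t ih =>
    cases j with
    | zero =>
      rw [removeTag, if_pos (List.isPrefixOf_iff_prefix.mpr (by simpa using hocc))]
      simp
    | succ j' =>
      have h0 : ¬ pvTag <+: (c :: t) := by simpa using hmin 0 (Nat.succ_pos _)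
      rw [removeTag, if_neg (fun hp => h0 (List.isPrefixOf_iff_prefix.mp hp))]
      rw [ih j' (by simpa using hocc) (fun i hi => by simpa using hmin (i+1) (by omega))]
      have hL : j' + 1 + pvTag.length = (j' + pvTag.length) + 1 := by omega
      rw [hL, List.drop_succ_cons, List.take_succ_cons]
      simp

-- B's replace.go with new = "" computes removeTag (fuel ≥ length never runs out)
lemma replace_go_eq (fuel : Nat) : ∀ (l acc : List Char), l.length ≤ fuel →
    PySem.Chars.replace.go pvTag [] fuel l acc = acc.reverse ++ removeTag l := by
  induction fuel with
  | zero => intro l acc h; simp at h; simp [h, PySem.Chars.replace.go, removeTag]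
  | succ f ih =>
    intro l acc h
    cases l with
    | nil => simp [PySem.Chars.replace.go, removeTag]
    | cons c t =>
      rw [PySem.Chars.replace.go, removeTag]
      by_cases hp : pvTag.isPrefixOf (c :: t) = true
      · simp only [hp, if_pos]
        rw [ih _ _ (by simp at h ⊢; simp [pvTag]; omega)]
        simp
      · simp only [hp]
        rw [if_neg (by simp [hp]), ih _ _ (by simp at h; omega)]
        simp

-- inside the found tag the first ']' is the tag's own closing bracket, at offset 7
lemma find_bracket (rest : List Char) : PySem.Chars.find (pvTag ++ rest) [']'] = 7 := by
  simp [pvTag, PySem.Chars.find, PySem.Chars.find.go, List.isPrefixOf]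

-- A's loop, started at cursor k with accumulator str2 and enough fuel, followed by the final
-- 'str2 + str1[agostart:len]' append, yields str2 ++ removeTag (suffix from k)
lemma loop_eq (cs : List Char) (fuel : Nat) : ∀ (k : Nat) (str2 : List Char),
    k ≤ cs.length → cs.length - k < fuel →
    (dowithcolor2Loop cs fuel k str2).2 ++
      PySem.List.slice cs (some (dowithcolor2Loop cs fuel k str2).1) (some (cs.length : Int)) =
    str2 ++ removeTag (cs.drop k) := by
  induction fuel with
  | zero => intro k _ _ h2; omega
  | succ f ih =>
    intro k str2 hk hf
    rw [dowithcolor2Loop]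
    simp only []
    rw [PySem.Chars.findFrom_natCast cs pvTag k hk]
    by_cases hfind : PySem.Chars.find (cs.drop k) pvTag = -1
    · simp only [hfind, if_pos]
      rw [removeTag_of_not_infix _ ((PySem.Chars.find_eq_neg_one_iff _ _).mp hfind)]
      rw [PySem.List.slice_natCast]
      congr 1
      exact List.take_of_length_le (by simp)
    · -- the tag is found: find (drop k cs) = j ≥ 0
      have hge : 0 ≤ PySem.Chars.find (cs.drop k) pvTag := by
        have := PySem.Chars.neg_one_le_find (cs.drop k) pvTag
        omega
      have hspec := PySem.Chars.find_spec (s := cs.drop k) (sub := pvTag) hge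
      obtain ⟨j, hj⟩ : ∃ j : Nat, PySem.Chars.find (cs.drop k) pvTag = (j : Int) :=
        ⟨_, (Int.toNat_of_nonneg hge).symm⟩
      rw [if_neg hfind, hj]
      rw [hj] at hspec
      simp only [Int.toNat_natCast] at hspec
      obtain ⟨hocc, hmin⟩ := hspec
      obtain ⟨rest, hrest⟩ := hocc
      rw [List.drop_drop] at hrest
      have hrest' : cs.drop (k + j) = pvTag ++ rest := hrest.symm
      have hkj : k + j + 8 ≤ cs.length := by
        have h8 : (cs.drop (k + j)).length = 8 + rest.length := by
          rw [hrest']; simp [pvTag]; omega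
        have := List.length_drop (l := cs) (i := k + j)
        omega
      have hcast : (k : Int) + (j : Int) = ((k + j : Nat) : Int) := by push_cast; ring
      rw [hcast]
      rw [PySem.Chars.findFrom_natCast cs [']'] (k + j) (by omega)]
      rw [hrest', find_bracket]
      have hif : (if (7 : Int) = -1 then (-1 : Int) else ((k + j : Nat) : Int) + 7) =
          ((k + j : Nat) : Int) + 7 := by norm_num
      rw [hif]
      have hcast2 : ((k + j : Nat) : Int) + 7 + 1 = ((k + j + 8 : Nat) : Int) := by
        push_cast; ring
      rw [hcast2]
      rw [if_neg (show ¬(((k + j : Nat) : Int) = -1) by omega)]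
      rw [ih (k + j + 8) _ (by omega) (by omega)]
      rw [PySem.List.slice_natCast]
      have hjj : k + j - k = j := by omega
      rw [hjj]
      have hremove : removeTag (cs.drop k) =
          (cs.drop k).take j ++ removeTag ((cs.drop k).drop (j + pvTag.length)) := by
        apply removeTag_first_occ
        · rw [List.drop_drop, hrest']
          exact ⟨rest, rfl⟩
        · exact hmin
      rw [hremove]
      have hd : (cs.drop k).drop (j + pvTag.length) = cs.drop (k + j + 8) := by
        rw [List.drop_drop]
        congr 1
      rw [hd, List.append_assoc]

-- ===== VERDICT (by name: the statement is the Claim_ definition above) =====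
theorem dowithcolor2_spec : Claim_equal_dowithcolor2 := by
  intro str1 _
  unfold Spec_dowithcolor2 dowithcolor2 dowithcolor2_alt
  simp only []
  have h := loop_eq str1.toList (str1.toList.length + 1) 0 [] (by omega) (by omega)
  simp only [Nat.cast_zero] at h
  rw [h]
  rw [PySem.Str.replace, PySem.Chars.replace]
  have htag : "[/color]".toList = pvTag := by decide
  have hnil : "".toList = ([] : List Char) := by decide
  rw [htag, hnil]
  rw [if_neg (by decide)]
  rw [replace_go_eq _ _ _ (le_refl _)]
  simp
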